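-- pv_equiv track=rewrite | github.com/ianwhale/pybrary-of-babel | src/pybrary_of_babel/generate.py | program_to_hex
-- ===== SOURCE A (Python) =====
-- def program_to_hex(
--     program: str,
--     ascii_min: int,
--     ascii_range: int,
-- ) -> str:
--     """Convert the given program string to a hex string.
--
--     Args:
--         program: ascii string to convert.
--         ascii_min: minimum ASCII value (inclusive) for readable characters.
--         ascii_range: number of distinct ASCII characters in the range.
--
--     Return:
--         hex string representing the program.
--     """
--     program_number = 0
--
--     for char in reversed(program):
--         char_index = ord(char) - ascii_min
--         program_number = program_number * ascii_range + char_index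
--
--     return hex(program_number)
-- ===== SOURCE B (Python) =====
-- def program_to_hex(
--     program: str,
--     ascii_min: int,
--     ascii_range: int,
-- ) -> str:
--     """Divide-and-conquer base conversion instead of Horner's linear scan."""
--     digits = [ord(c) - ascii_min for c in program]
--
--     def value(lo, hi):
--         # value of digits[lo:hi] with digit lo least significant
--         if hi - lo <= 1:
--             return digits[lo] if hi > lo else 0
--         mid = (lo + hi) // 2
--         return value(lo, mid) + ascii_range ** (mid - lo) * value(mid, hi)
--
--     return hex(value(0, len(digits)))
-- ===== Notes on version B (the rewrite author's own statement) =====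
-- stated objective: faster
-- what changed: Replaced the linear Horner accumulation (each step multiplies the full big accumulator by ascii_range) with a divide-and-conquer base conversion that combines halves with one balanced big multiplication per node, letting Python's subquadratic big-int multiplication apply.
import Mathlib
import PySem

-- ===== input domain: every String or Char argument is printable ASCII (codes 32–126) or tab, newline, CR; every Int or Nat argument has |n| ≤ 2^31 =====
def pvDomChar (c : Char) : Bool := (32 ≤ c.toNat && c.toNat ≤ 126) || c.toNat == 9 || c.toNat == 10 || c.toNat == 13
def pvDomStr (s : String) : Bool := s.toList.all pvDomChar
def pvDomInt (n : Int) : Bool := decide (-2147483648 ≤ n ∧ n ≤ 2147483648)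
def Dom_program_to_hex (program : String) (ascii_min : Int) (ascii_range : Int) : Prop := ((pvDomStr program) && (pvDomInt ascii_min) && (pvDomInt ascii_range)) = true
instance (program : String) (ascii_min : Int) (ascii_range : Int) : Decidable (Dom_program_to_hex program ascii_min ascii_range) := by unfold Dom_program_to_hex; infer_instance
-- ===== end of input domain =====

-- B replaces A's linear Horner accumulation by a divide-and-conquer base conversion (objective: faster big-int arithmetic).


-- ===== PORT A =====
-- Port of Python's builtin hex(): '0x'/-'0x' prefix and lowercase hex digits of |n|
-- (Nat.toDigits 16 yields exactly Python's lowercase digit string, with "0" for 0);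
-- exact on all Int. Shared by both ports because both Pythons call the builtin hex().
def pyHex (n : Int) : String :=
  (if n < 0 then "-0x" else "0x") ++ String.ofList (Nat.toDigits 16 n.natAbs)

-- literal transliteration of A: Horner loop over reversed(program), then hex()
def program_to_hex (program : String) (ascii_min : Int) (ascii_range : Int) : String :=
  let program_number :=
    (program.toList.reverse).foldl
      (fun acc c => acc * ascii_range + ((c.toNat : Int) - ascii_min)) 0
  pyHex program_number

-- ===== PORT B =====
-- B's recursive value(lo, hi) on digits[lo:hi]; ported on the sublist itself:
-- the split index mid - lo equals (hi - lo) / 2 = length / 2 of the sublist.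
def dcVal (r : Int) : List Int → Int
  | [] => 0
  | [d] => d
  | d0 :: d1 :: rest =>
    let ds := d0 :: d1 :: rest
    let m := ds.length / 2
    dcVal r (ds.take m) + r ^ m * dcVal r (ds.drop m)
termination_by ds => ds.length
decreasing_by
  · simp [List.length_take]; omega
  · simp; omega

def program_to_hex_alt (program : String) (ascii_min : Int) (ascii_range : Int) : String :=
  let digits := program.toList.map (fun c => (c.toNat : Int) - ascii_min)
  pyHex (dcVal ascii_range digits)

-- ===== PRECONDITION & SPEC =====
def Spec_program_to_hex (program : String) (ascii_min : Int) (ascii_range : Int) (out : String) : Prop := out = program_to_hex_alt program ascii_min ascii_range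
instance (program : String) (ascii_min : Int) (ascii_range : Int) (out : String) : Decidable (Spec_program_to_hex program ascii_min ascii_range out) := by unfold Spec_program_to_hex; infer_instance

-- ===== CLAIM (what is proved, stated in full; the proofs are below) =====
def Claim_equal_program_to_hex : Prop := ∀ (program : String) (ascii_min : Int) (ascii_range : Int), Dom_program_to_hex program ascii_min ascii_range → Spec_program_to_hex program ascii_min ascii_range (program_to_hex program ascii_min ascii_range)

-- ===== LEMMAS AND PROOFS =====

-- positional value of a digit list (digit 0 least significant), the common reference
def poly (r : Int) (ds : List Int) : Int := ds.foldr (fun d a => a * r + d) 0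

theorem poly_cons (r d : Int) (ds : List Int) : poly r (d :: ds) = poly r ds * r + d := rfl

theorem poly_append (r : Int) (xs ys : List Int) :
    poly r (xs ++ ys) = poly r xs + r ^ xs.length * poly r ys := by
  induction xs with
  | nil => simp [poly]
  | cons d t ih =>
    simp only [List.cons_append, poly_cons, ih, List.length_cons]
    ring

theorem dcVal_eq_poly (r : Int) (ds : List Int) : dcVal r ds = poly r ds := by
  fun_induction dcVal r ds with
  | case1 => rfl
  | case2 d => simp [poly]
  | case3 d0 d1 rest ds m ih1 ih2 =>
    have h := poly_append r ((d0 :: d1 :: rest).take ((d0 :: d1 :: rest).length / 2))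
      ((d0 :: d1 :: rest).drop ((d0 :: d1 :: rest).length / 2))
    rw [List.take_append_drop, List.length_take,
      Nat.min_eq_left (Nat.div_le_self _ _)] at h
    rw [ih1, ih2]
    exact h.symm

-- ===== VERDICT (by name: the statement is the Claim_ definition above) =====
theorem program_to_hex_spec : Claim_equal_program_to_hex := by
  intro program ascii_min ascii_range _
  unfold Spec_program_to_hex program_to_hex program_to_hex_alt
  dsimp only
  rw [dcVal_eq_poly]
  congr 1
  rw [List.foldl_reverse]
  unfold poly
  rw [List.foldr_map]
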